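-- pv_equiv track=rewrite | github.com/Shweta46/Python_practice | Challenges/total_moves_for_bishop.py | bishop_fucking_moves
-- ===== SOURCE A (Python) =====
-- def bishop_fucking_moves(a, b):
--     max_i = 3
--     max_j = 3
--     count = 0
--     a1 = a
--     b1 = b
--     while a1 < max_i and b1 < max_j:
--         count += 1
--         a1 += 1
--         b1 += 1
--
--     a1 = a
--     b1 = b
--     while a1 < max_i and b1 > 1:
--         count += 1
--         a1 += 1
--         b1 -= 1
--
--     a1 = a
--     b1 = b
--     while a1 > 1 and b1 < max_j:
--         count += 1
--         a1 -= 1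
--         b1 += 1
--
--     a1 = a
--     b1 = b
--     while a1 > 1 and b1 > 1:
--         count += 1
--         a1 -= 1
--         b1 -= 1
--
--     return count
-- ===== SOURCE B (Python) =====
-- def bishop_fucking_moves(a, b):
--     # Closed form: each diagonal ray length is the distance to the nearest
--     # blocking bound in that direction, clamped at zero.
--     return (max(0, min(3 - a, 3 - b))
--             + max(0, min(3 - a, b - 1))
--             + max(0, min(a - 1, 3 - b))
--             + max(0, min(a - 1, b - 1)))
-- ===== Notes on version B (the rewrite author's own statement) =====
-- stated objective: simpler
-- what changed: Replaced the four counting while-loops with a single closed-form sum of the four clamped diagonal ray lengths.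
import Mathlib
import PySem

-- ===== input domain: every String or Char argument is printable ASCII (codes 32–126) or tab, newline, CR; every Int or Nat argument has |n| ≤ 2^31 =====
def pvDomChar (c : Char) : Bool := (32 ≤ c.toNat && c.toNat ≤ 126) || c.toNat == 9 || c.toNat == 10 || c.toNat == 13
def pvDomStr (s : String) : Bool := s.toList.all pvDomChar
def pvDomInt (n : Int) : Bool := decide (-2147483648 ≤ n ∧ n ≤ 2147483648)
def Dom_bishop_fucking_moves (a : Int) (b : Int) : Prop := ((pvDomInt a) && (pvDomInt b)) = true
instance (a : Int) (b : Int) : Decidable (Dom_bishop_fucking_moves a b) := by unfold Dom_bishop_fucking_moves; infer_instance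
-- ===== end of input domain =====

-- B replaces A's four counting while-loops by one closed-form sum of clamped ray lengths (simpler).

-- ===== PORT A =====
-- Each Python while-loop becomes a structural recursion over the same state.
def bfmLoop1 (a1 b1 count : Int) : Int :=
  if a1 < 3 ∧ b1 < 3 then bfmLoop1 (a1 + 1) (b1 + 1) (count + 1) else count
  termination_by (3 - a1).toNat
  decreasing_by omega

def bfmLoop2 (a1 b1 count : Int) : Int :=
  if a1 < 3 ∧ b1 > 1 then bfmLoop2 (a1 + 1) (b1 - 1) (count + 1) else count
  termination_by (3 - a1).toNat
  decreasing_by omega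

def bfmLoop3 (a1 b1 count : Int) : Int :=
  if a1 > 1 ∧ b1 < 3 then bfmLoop3 (a1 - 1) (b1 + 1) (count + 1) else count
  termination_by (a1 - 1).toNat
  decreasing_by omega

def bfmLoop4 (a1 b1 count : Int) : Int :=
  if a1 > 1 ∧ b1 > 1 then bfmLoop4 (a1 - 1) (b1 - 1) (count + 1) else count
  termination_by (a1 - 1).toNat
  decreasing_by omega

def bishop_fucking_moves (a : Int) (b : Int) : Int :=
  let count := bfmLoop1 a b 0
  let count := bfmLoop2 a b count
  let count := bfmLoop3 a b count
  bfmLoop4 a b count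

-- ===== PORT B =====
def bishop_fucking_moves_alt (a : Int) (b : Int) : Int :=
  max 0 (min (3 - a) (3 - b)) + max 0 (min (3 - a) (b - 1))
    + max 0 (min (a - 1) (3 - b)) + max 0 (min (a - 1) (b - 1))

-- ===== PRECONDITION & SPEC =====
def Spec_bishop_fucking_moves (a : Int) (b : Int) (out : Int) : Prop := out = bishop_fucking_moves_alt a b
instance (a : Int) (b : Int) (out : Int) : Decidable (Spec_bishop_fucking_moves a b out) := by unfold Spec_bishop_fucking_moves; infer_instance

-- ===== CLAIM (what is proved, stated in full; the proofs are below) =====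
def Claim_equal_bishop_fucking_moves : Prop := ∀ (a : Int) (b : Int), Dom_bishop_fucking_moves a b → Spec_bishop_fucking_moves a b (bishop_fucking_moves a b)

-- ===== LEMMAS AND PROOFS =====
theorem bfmLoop1_eq (a1 b1 count : Int) :
    bfmLoop1 a1 b1 count = count + max 0 (min (3 - a1) (3 - b1)) := by
  fun_induction bfmLoop1 a1 b1 count with
  | case1 a1 b1 c _ ih => rw [ih]; omega
  | case2 a1 b1 c h => omega

theorem bfmLoop2_eq (a1 b1 count : Int) :
    bfmLoop2 a1 b1 count = count + max 0 (min (3 - a1) (b1 - 1)) := by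
  fun_induction bfmLoop2 a1 b1 count with
  | case1 a1 b1 c _ ih => rw [ih]; omega
  | case2 a1 b1 c h => omega

theorem bfmLoop3_eq (a1 b1 count : Int) :
    bfmLoop3 a1 b1 count = count + max 0 (min (a1 - 1) (3 - b1)) := by
  fun_induction bfmLoop3 a1 b1 count with
  | case1 a1 b1 c _ ih => rw [ih]; omega
  | case2 a1 b1 c h => omega

theorem bfmLoop4_eq (a1 b1 count : Int) :
    bfmLoop4 a1 b1 count = count + max 0 (min (a1 - 1) (b1 - 1)) := by
  fun_induction bfmLoop4 a1 b1 count with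
  | case1 a1 b1 c _ ih => rw [ih]; omega
  | case2 a1 b1 c h => omega

-- ===== VERDICT (by name: the statement is the Claim_ definition above) =====
theorem bishop_fucking_moves_spec : Claim_equal_bishop_fucking_moves := by
  intro a b _
  unfold Spec_bishop_fucking_moves bishop_fucking_moves bishop_fucking_moves_alt
  simp only [bfmLoop1_eq, bfmLoop2_eq, bfmLoop3_eq, bfmLoop4_eq]
  omega
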